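-- pv_equiv track=rewrite | github.com/lumijiez/discretemath-labs | LabMD_2/check.py | checkComposition
-- ===== SOURCE A (Python) =====
-- def checkComposition(psw):
--     values = [0, 0, 0, 0]
--     for x in psw:
--         if x.islower():
--             values[0] = 1
--         if x.isnumeric():
--             values[1] = 1
--         if x.isupper():
--             values[2] = 1
--         if x in ['@', '_', '!', '#', '$', '%', '^', '&', '*', '(', ')', '<', '>', '?', '/', '\'', '|', '}', '{', '~',
--                  ':', '-']:
--             values[3] = 1
--     return values.count(0)
-- ===== SOURCE B (Python) =====
-- def checkComposition(psw):
--     specials = ['@', '_', '!', '#', '$', '%', '^', '&', '*', '(', ')', '<', '>', '?', '/', '\'', '|', '}', '{', '~',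
--                 ':', '-']
--     present = (any(c.islower() for c in psw)
--                + any(c.isnumeric() for c in psw)
--                + any(c.isupper() for c in psw)
--                + any(c in specials for c in psw))
--     return 4 - present
-- ===== Notes on version B (the rewrite author's own statement) =====
-- stated objective: simpler
-- what changed: Replaces the single-pass loop that mutates a four-slot flag list and counts zeros with four independent short-circuiting any() scans whose boolean sum is subtracted from 4.
import Mathlib
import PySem

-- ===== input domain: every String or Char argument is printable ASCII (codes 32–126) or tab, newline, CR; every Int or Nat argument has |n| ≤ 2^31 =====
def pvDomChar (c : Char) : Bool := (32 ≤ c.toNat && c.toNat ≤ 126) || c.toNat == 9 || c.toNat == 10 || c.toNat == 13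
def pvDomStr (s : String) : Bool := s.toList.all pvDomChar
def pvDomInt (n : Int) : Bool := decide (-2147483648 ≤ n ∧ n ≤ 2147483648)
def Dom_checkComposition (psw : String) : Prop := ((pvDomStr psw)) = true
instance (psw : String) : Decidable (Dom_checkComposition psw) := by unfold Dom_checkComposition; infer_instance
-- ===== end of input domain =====

-- B replaces A's single-pass four-flag loop with four independent any-scans summed and subtracted from 4 (objective: simpler).

-- ===== PORT A =====
-- the special-character list of A, verbatim
def pvSpecials : List Char :=
  ['@', '_', '!', '#', '$', '%', '^', '&', '*', '(', ')', '<', '>', '?', '/', '\'', '|', '}', '{', '~', ':', '-']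

-- A's loop body: mutate the four flag slots in order
def pvStep (v : Int × Int × Int × Int) (x : Char) : Int × Int × Int × Int :=
  let v := if PySem.Chars.islower x then (1, v.2.1, v.2.2.1, v.2.2.2) else v
  let v := if PySem.Chars.isdigit x then (v.1, 1, v.2.2.1, v.2.2.2) else v
  let v := if PySem.Chars.isupper x then (v.1, v.2.1, 1, v.2.2.2) else v
  let v := if pvSpecials.contains x then (v.1, v.2.1, v.2.2.1, 1) else v
  v

def checkComposition (psw : String) : Int :=
  let values := psw.toList.foldl pvStep (0, 0, 0, 0)
  (if values.1 = 0 then (1 : Int) else 0) + (if values.2.1 = 0 then 1 else 0)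
    + (if values.2.2.1 = 0 then 1 else 0) + (if values.2.2.2 = 0 then 1 else 0)

-- ===== PORT B =====
def checkComposition_alt (psw : String) : Int :=
  let l := psw.toList
  let present : Int :=
    (if l.any PySem.Chars.islower then 1 else 0)
    + (if l.any PySem.Chars.isdigit then 1 else 0)
    + (if l.any PySem.Chars.isupper then 1 else 0)
    + (if l.any (fun c => pvSpecials.contains c) then 1 else 0)
  4 - present

-- ===== PRECONDITION & SPEC =====
def Spec_checkComposition (psw : String) (out : Int) : Prop := out = checkComposition_alt psw
instance (psw : String) (out : Int) : Decidable (Spec_checkComposition psw out) := by unfold Spec_checkComposition; infer_instance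

-- ===== CLAIM (what is proved, stated in full; the proofs are below) =====
def Claim_equal_checkComposition : Prop := ∀ (psw : String), Dom_checkComposition psw → Spec_checkComposition psw (checkComposition psw)

-- ===== LEMMAS AND PROOFS =====
lemma pvStep_eq (a b c d : Int) (x : Char) :
    pvStep (a, b, c, d) x =
      ((if PySem.Chars.islower x then 1 else a),
       (if PySem.Chars.isdigit x then 1 else b),
       (if PySem.Chars.isupper x then 1 else c),
       (if pvSpecials.contains x then 1 else d)) := by
  simp only [pvStep]; split_ifs <;> rfl

lemma pvFold_eq (l : List Char) (a b c d : Int) :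
    l.foldl pvStep (a, b, c, d) =
      ((if l.any PySem.Chars.islower then 1 else a),
       (if l.any PySem.Chars.isdigit then 1 else b),
       (if l.any PySem.Chars.isupper then 1 else c),
       (if l.any (fun x => pvSpecials.contains x) then 1 else d)) := by
  induction l generalizing a b c d with
  | nil => simp
  | cons x xs ih =>
    rw [List.foldl_cons, pvStep_eq, ih]
    cases hb1 : PySem.Chars.islower x <;>
    cases hb2 : PySem.Chars.isdigit x <;>
    cases hb3 : PySem.Chars.isupper x <;>
    cases hb4 : pvSpecials.contains x <;>
    simp only [List.contains_eq_mem, decide_eq_true_eq, decide_eq_false_iff_not] at hb4 <;>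
    simp [hb1, hb2, hb3, hb4]

-- ===== VERDICT (by name: the statement is the Claim_ definition above) =====
theorem checkComposition_spec : Claim_equal_checkComposition := by
  intro psw _
  unfold Spec_checkComposition checkComposition checkComposition_alt
  rw [pvFold_eq]
  cases h1 : psw.toList.any PySem.Chars.islower <;>
  cases h2 : psw.toList.any PySem.Chars.isdigit <;>
  cases h3 : psw.toList.any PySem.Chars.isupper <;>
  cases h4 : psw.toList.any (fun x => pvSpecials.contains x) <;>
  simp only [h1, h2, h3, h4, if_true, if_false] <;> norm_num
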